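-- pv_equiv track=rewrite | github.com/sy201422/DCA1000_radar | tools/dbscan_cluster.py | _merge_band_description
-- ===== SOURCE A (Python) =====
-- from typing import Iterable, List, Mapping, Optional
--
-- def _merge_band_description(desc_a: Optional[str], desc_b: Optional[str]) -> Optional[str]:
--     descriptions = [desc for desc in (desc_a, desc_b) if desc]
--     if not descriptions:
--         return None
--
--     unique_descriptions = []
--     for description in descriptions:
--         if description not in unique_descriptions:
--             unique_descriptions.append(description)
--     return "|".join(unique_descriptions)
-- ===== SOURCE B (Python) =====
-- from typing import Optional
--
-- def _merge_band_description(desc_a: Optional[str], desc_b: Optional[str]) -> Optional[str]: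
--     if desc_a and desc_b:
--         return desc_a if desc_a == desc_b else desc_a + "|" + desc_b
--     return desc_a or desc_b or None
-- ===== Notes on version B (the rewrite author's own statement) =====
-- stated objective: simpler
-- what changed: Replaces the filtered-list/dedup-loop/join pipeline with direct truthiness branching on the two optional arguments.
import Mathlib
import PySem

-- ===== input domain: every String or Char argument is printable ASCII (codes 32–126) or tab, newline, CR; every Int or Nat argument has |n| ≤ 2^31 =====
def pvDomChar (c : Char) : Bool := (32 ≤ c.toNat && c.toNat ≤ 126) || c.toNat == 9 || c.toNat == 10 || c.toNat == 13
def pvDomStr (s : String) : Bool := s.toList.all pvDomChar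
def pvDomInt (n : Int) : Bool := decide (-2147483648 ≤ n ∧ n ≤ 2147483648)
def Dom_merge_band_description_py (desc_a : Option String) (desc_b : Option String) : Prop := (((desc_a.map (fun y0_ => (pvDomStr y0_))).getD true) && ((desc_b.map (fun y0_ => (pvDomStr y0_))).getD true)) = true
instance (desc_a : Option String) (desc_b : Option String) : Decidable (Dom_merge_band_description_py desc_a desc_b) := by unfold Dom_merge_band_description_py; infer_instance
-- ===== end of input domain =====

-- B replaces A's filter/dedup-loop/join pipeline by direct truthiness branching on the two arguments (objective: simpler).

-- ===== PORT A =====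
-- [desc for desc in (desc_a, desc_b) if desc]  (truthy str = non-empty)
def merge_band_description_py (desc_a : Option String) (desc_b : Option String) : Option String :=
  let descriptions := [desc_a, desc_b].foldl
    (fun acc d => match d with
      | some s => if s ≠ "" then acc ++ [s] else acc
      | none => acc) []
  if descriptions = [] then none
  else
    -- dedup loop: append each description not already present
    let unique_descriptions := descriptions.foldl
      (fun acc d => if d ∈ acc then acc else acc ++ [d]) []
    some (PySem.Str.join "|" unique_descriptions)

-- ===== PORT B =====
def pyTruthyStr (o : Option String) : Bool :=
  match o with
  | some s => s ≠ ""
  | none => false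

def merge_band_description_py_alt (desc_a : Option String) (desc_b : Option String) : Option String :=
  if pyTruthyStr desc_a && pyTruthyStr desc_b then
    if desc_a = desc_b then desc_a
    else some (String.ofList ((desc_a.getD "").toList ++ '|' :: (desc_b.getD "").toList))  -- exact port of desc_a + "|" + desc_b
  else if pyTruthyStr desc_a then desc_a
  else if pyTruthyStr desc_b then desc_b
  else none

-- ===== PRECONDITION & SPEC =====
def Spec_merge_band_description_py (desc_a : Option String) (desc_b : Option String) (out : Option String) : Prop := out = merge_band_description_py_alt desc_a desc_b
instance (desc_a : Option String) (desc_b : Option String) (out : Option String) : Decidable (Spec_merge_band_description_py desc_a desc_b out) := by unfold Spec_merge_band_description_py; infer_instance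

-- ===== CLAIM (what is proved, stated in full; the proofs are below) =====
def Claim_equal_merge_band_description_py : Prop := ∀ (desc_a : Option String) (desc_b : Option String), Dom_merge_band_description_py desc_a desc_b → Spec_merge_band_description_py desc_a desc_b (merge_band_description_py desc_a desc_b)

-- ===== LEMMAS AND PROOFS =====

theorem join_two (sa sb : String) :
    PySem.Str.join "|" [sa, sb] = String.ofList (sa.toList ++ '|' :: sb.toList) := by
  simp [PySem.Str.join, PySem.Chars.join, List.intercalate]

theorem join_one (s : String) : PySem.Str.join "|" [s] = s := by
  simp [PySem.Str.join, PySem.Chars.join, List.intercalate]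

-- ===== VERDICT (by name: the statement is the Claim_ definition above) =====
theorem merge_band_description_py_spec : Claim_equal_merge_band_description_py := by
  intro desc_a desc_b _
  unfold Spec_merge_band_description_py merge_band_description_py merge_band_description_py_alt
  rcases desc_a with _ | sa <;> rcases desc_b with _ | sb <;>
    simp only [pyTruthyStr, List.foldl] <;>
    [skip; by_cases hb : sb = ""; by_cases ha : sa = "";
     (by_cases ha : sa = "" <;> by_cases hb : sb = "")] <;>
    simp_all [join_one, List.foldl] <;>
  · by_cases hab : sb = sa <;> simp_all [join_one, join_two, eq_comm]
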